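-- pv_equiv track=rewrite | github.com/jpetracci/aoc | 2019/2b.py | findInputs
-- ===== SOURCE A (Python) =====
-- def performOps(op, i):
--     try:
--         if op[i] == 1:
--             # add
--             op[op[i+3]] = op[op[i+1]]+op[op[i+2]]
--
--         elif op[i] == 2:
--             # mult
--             op[op[i+3]] = op[op[i+1]]*op[op[i+2]]
--
--         elif op[i] == 99:
--             # exit
--             return op
--
--         return performOps(op, i+4)
--
--     except IndexError:
--         return op
--
-- def findInputs(ops, num):
--     pos1 = 0
--     pos2 = 0
--     temp = ops
--
--     for p1 in range(0,100):
--         for p2 in range(0,100):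
--             temp = ops.copy()
--             temp[1] = p1
--             temp[2] = p2
--             performOps(temp,0)
--             if temp[0] == num:
--                 pos1 = p1
--                 pos2 = p2
--
--     return [pos1, pos2]
-- ===== SOURCE B (Python) =====
-- def _run(op):
--     # Exception-free iterative intcode interpreter mutating op in place.
--     n = len(op)
--     i = 0
--     while i < n:
--         c = op[i]
--         if c == 99:
--             return op
--         if c == 1 or c == 2:
--             if i + 3 >= n:
--                 return op
--             a, b, d = op[i+1], op[i+2], op[i+3]
--             if not (-n <= a < n and -n <= b < n and -n <= d < n):
--                 return op
--             op[d] = op[a] + op[b] if c == 1 else op[a] * op[b]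
--         i += 4
--     return op
--
-- def findInputs(ops, num):
--     # Scan pairs in reverse lexicographic order; the first hit is A's last hit.
--     for p1 in range(99, -1, -1):
--         for p2 in range(99, -1, -1):
--             temp = ops.copy()
--             temp[1] = p1
--             temp[2] = p2
--             _run(temp)
--             if temp[0] == num:
--                 return [p1, p2]
--     return [0, 0]
-- ===== Notes on version B (the rewrite author's own statement) =====
-- stated objective: alternative
-- what changed: performOps's recursive exception-driven dispatch is replaced by an iterative interpreter with explicit bounds checks (no exceptions, no recursion), and the 100x100 noun/verb grid is scanned in reverse lexicographic order returning on the first hit, which equals A's kept last hit.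
import Mathlib
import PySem

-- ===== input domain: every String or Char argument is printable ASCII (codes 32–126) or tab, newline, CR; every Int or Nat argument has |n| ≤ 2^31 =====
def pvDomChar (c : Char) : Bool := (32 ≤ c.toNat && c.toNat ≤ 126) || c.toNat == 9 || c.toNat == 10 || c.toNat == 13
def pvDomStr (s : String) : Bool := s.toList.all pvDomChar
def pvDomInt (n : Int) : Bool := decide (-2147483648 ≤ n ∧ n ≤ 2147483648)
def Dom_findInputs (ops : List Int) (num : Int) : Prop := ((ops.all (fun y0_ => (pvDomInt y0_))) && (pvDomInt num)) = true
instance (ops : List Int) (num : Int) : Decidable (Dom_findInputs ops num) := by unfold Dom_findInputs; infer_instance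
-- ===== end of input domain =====

-- B replaces A's recursive, exception-driven interpreter by an iterative bounds-checked one and
-- scans the 100×100 noun/verb grid in reverse, returning the first hit (= A's last hit); return
-- value only — A mutates its local copies, no argument of findInputs is observably mutated.

-- ===== PORT A =====

-- performOps's add/mult instruction: reads op[op[i+1]], op[op[i+2]], writes op[op[i+3]];
-- `none` = the IndexError that A's `except IndexError: return op` catches (no mutation happened yet).
def pvTryBinop (op : List Int) (i : Nat) (f : Int → Int → Int) : Option (List Int) :=
  (op[i+1]?.bind (fun j => PySem.List.pyGet? op j)).bind fun x =>
  (op[i+2]?.bind (fun j => PySem.List.pyGet? op j)).bind fun y =>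
  op[i+3]?.bind fun d => PySem.List.pySet? op d (f x y)

-- cited by the decreasing_by of performOpsA
theorem pvTryBinop_length {op op' : List Int} {i : Nat} {f : Int → Int → Int}
    (h : pvTryBinop op i f = some op') : op'.length = op.length := by
  unfold pvTryBinop at h
  rcases hx : op[i+1]?.bind (fun j => PySem.List.pyGet? op j) with _ | x <;> rw [hx] at h <;> simp at h
  rcases hy : op[i+2]?.bind (fun j => PySem.List.pyGet? op j) with _ | y <;> rw [hy] at h <;> simp at h
  rcases hd : op[i+3]? with _ | d <;> rw [hd] at h <;> simp at h
  rcases hs : PySem.List.pySet? op d (f x y) with _ | l <;> rw [hs] at h <;> simp at h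
  subst h
  unfold PySem.List.pySet? at hs
  rcases hk : PySem.List.pyIdx? op.length d with _ | k <;> rw [hk] at hs <;> simp at hs
  simp [← hs]

def performOpsA (op : List Int) (i : Nat) : List Int :=
  match hc : op[i]? with
  | none => op                                   -- IndexError reading op[i]
  | some c =>
    if c = 1 then
      match hb : pvTryBinop op i (· + ·) with
      | none => op                               -- IndexError inside the instruction
      | some op' => performOpsA op' (i+4)
    else if c = 2 then
      match hb : pvTryBinop op i (· * ·) with
      | none => op
      | some op' => performOpsA op' (i+4)
    else if c = 99 then op
    else performOpsA op (i+4)                    -- unknown opcode falls through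
termination_by op.length - i
decreasing_by
  · have hi := (List.getElem?_eq_some_iff.mp hc).1
    have := pvTryBinop_length hb; omega
  · have hi := (List.getElem?_eq_some_iff.mp hc).1
    have := pvTryBinop_length hb; omega
  · have hi := (List.getElem?_eq_some_iff.mp hc).1; omega

def findInputs (ops : List Int) (num : Int) : List Int :=
  let r := (PySem.List.pyRange 0 100 1).foldl (fun (pos : Int × Int) p1 =>
      (PySem.List.pyRange 0 100 1).foldl (fun pos p2 =>
        let temp := performOpsA (PySem.List.pySetD (PySem.List.pySetD ops 1 p1) 2 p2) 0
        if PySem.List.pyGetD temp 0 0 = num then (p1, p2) else pos) pos)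
    ((0 : Int), (0 : Int))
  [r.1, r.2]

-- ===== PORT B =====

-- Source B's _run: iterative interpreter, explicit bounds checks instead of exceptions.
def pvRunAlt (op : List Int) (i : Nat) : List Int :=
  if hi : i < op.length then
    let c := op[i]
    if c = 99 then op
    else if c = 1 ∨ c = 2 then
      if h3 : i + 3 < op.length then
        let a := op[i+1]'(by omega)
        let b := op[i+2]'(by omega)
        let d := op[i+3]
        if PySem.Raise.InRange op.length a ∧ PySem.Raise.InRange op.length b ∧
           PySem.Raise.InRange op.length d then
          let v := if c = 1 then PySem.List.pyGetD op a 0 + PySem.List.pyGetD op b 0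
                   else PySem.List.pyGetD op a 0 * PySem.List.pyGetD op b 0
          pvRunAlt (PySem.List.pySetD op d v) (i+4)
        else op
      else op
    else pvRunAlt op (i+4)
  else op
termination_by op.length - i
decreasing_by
  · rw [PySem.List.length_pySetD]; omega
  · omega

def findInputs_alt (ops : List Int) (num : Int) : List Int :=
  ((PySem.List.pyRange 99 (-1) (-1)).findSome? (fun p1 =>
    (PySem.List.pyRange 99 (-1) (-1)).findSome? (fun p2 =>
      let temp := pvRunAlt (PySem.List.pySetD (PySem.List.pySetD ops 1 p1) 2 p2) 0
      if PySem.List.pyGetD temp 0 0 = num then some [p1, p2] else none))).getD [0, 0]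

-- ===== PRECONDITION & SPEC =====
-- Pre_ excludes only lists shorter than 3, on which the Python A (and B) raise IndexError at temp[1]/temp[2]/temp[0].
def Pre_findInputs (ops : List Int) (num : Int) : Prop := 3 ≤ ops.length
instance (ops : List Int) (num : Int) : Decidable (Pre_findInputs ops num) := by unfold Pre_findInputs; infer_instance
def pvWitness_findInputs : List Int × Int := ([1, 0, 0, 0, 99], 0)

def Spec_findInputs (ops : List Int) (num : Int) (out : List Int) : Prop := out = findInputs_alt ops num
instance (ops : List Int) (num : Int) (out : List Int) : Decidable (Spec_findInputs ops num out) := by unfold Spec_findInputs; infer_instance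

-- ===== CLAIM (what is proved, stated in full; the proofs are below) =====
def Claim_equal_findInputs : Prop := ∀ (ops : List Int) (num : Int), Dom_findInputs ops num → Pre_findInputs ops num → Spec_findInputs ops num (findInputs ops num)

-- ===== LEMMAS AND PROOFS =====

-- characterization of pvTryBinop under i+3 < len
theorem tb_some (op : List Int) (i : Nat) (f : Int → Int → Int) (h3 : i + 3 < op.length)
    (ha : PySem.Raise.InRange op.length (op[i+1]'(by omega)))
    (hb : PySem.Raise.InRange op.length (op[i+2]'(by omega)))
    (hd : PySem.Raise.InRange op.length op[i+3]) :
    pvTryBinop op i f = some (PySem.List.pySetD op op[i+3]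
      (f (PySem.List.pyGetD op (op[i+1]'(by omega)) 0) (PySem.List.pyGetD op (op[i+2]'(by omega)) 0))) := by
  have h1 : op[i+1]? = some (op[i+1]'(by omega)) := List.getElem?_eq_getElem (by omega)
  have h2 : op[i+2]? = some (op[i+2]'(by omega)) := List.getElem?_eq_getElem (by omega)
  have h3' : op[i+3]? = some op[i+3] := List.getElem?_eq_getElem (by omega)
  rcases hx : PySem.List.pyGet? op (op[i+1]'(by omega)) with _ | x
  · exact absurd (PySem.List.pyGet?_eq_none_iff _ _ |>.mp hx) (by simpa using ha)
  rcases hy : PySem.List.pyGet? op (op[i+2]'(by omega)) with _ | y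
  · exact absurd (PySem.List.pyGet?_eq_none_iff _ _ |>.mp hy) (by simpa using hb)
  rcases hs : PySem.List.pySet? op op[i+3] (f x y) with _ | l
  · exact absurd (PySem.List.pySet?_eq_none_iff _ _ _ |>.mp hs) (by simpa using hd)
  have hgx : PySem.List.pyGetD op (op[i+1]'(by omega)) 0 = x := by simp [PySem.List.pyGetD, hx]
  have hgy : PySem.List.pyGetD op (op[i+2]'(by omega)) 0 = y := by simp [PySem.List.pyGetD, hy]
  have hsd : PySem.List.pySetD op op[i+3] (f x y) = l := by simp [PySem.List.pySetD, hs]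
  simp [pvTryBinop, h1, h2, h3', hx, hy, hgx, hgy, hsd, hs]

theorem tb_none_oob (op : List Int) (i : Nat) (f : Int → Int → Int) (h3 : ¬ i + 3 < op.length) :
    pvTryBinop op i f = none := by
  have hd : op[i+3]? = none := by rw [List.getElem?_eq_none_iff]; omega
  unfold pvTryBinop
  rcases hx : op[i+1]?.bind (fun j => PySem.List.pyGet? op j) with _ | x
  · rfl
  rcases hy : op[i+2]?.bind (fun j => PySem.List.pyGet? op j) with _ | y
  · rfl
  simp [hd]

theorem tb_none_bad (op : List Int) (i : Nat) (f : Int → Int → Int) (h3 : i + 3 < op.length)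
    (hbad : ¬ (PySem.Raise.InRange op.length (op[i+1]'(by omega)) ∧
               PySem.Raise.InRange op.length (op[i+2]'(by omega)) ∧
               PySem.Raise.InRange op.length op[i+3])) :
    pvTryBinop op i f = none := by
  have h1 : op[i+1]? = some (op[i+1]'(by omega)) := List.getElem?_eq_getElem (by omega)
  have h2 : op[i+2]? = some (op[i+2]'(by omega)) := List.getElem?_eq_getElem (by omega)
  have h3' : op[i+3]? = some op[i+3] := List.getElem?_eq_getElem (by omega)
  unfold pvTryBinop
  by_cases ha : PySem.Raise.InRange op.length (op[i+1]'(by omega))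
  · by_cases hbb : PySem.Raise.InRange op.length (op[i+2]'(by omega))
    · have hd : ¬ PySem.Raise.InRange op.length op[i+3] := by tauto
      rcases hx : PySem.List.pyGet? op (op[i+1]'(by omega)) with _ | x
      · simp [h1, hx]
      rcases hy : PySem.List.pyGet? op (op[i+2]'(by omega)) with _ | y
      · simp [h1, h2, hx, hy]
      simp [h1, h2, h3', hx, hy, (PySem.List.pySet?_eq_none_iff _ _ _).mpr hd]
    · have : PySem.List.pyGet? op (op[i+2]'(by omega)) = none := (PySem.List.pyGet?_eq_none_iff _ _).mpr hbb
      simp [h1, h2, this]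
  · have : PySem.List.pyGet? op (op[i+1]'(by omega)) = none := (PySem.List.pyGet?_eq_none_iff _ _).mpr ha
    simp [h1, this]

theorem pvSim (op : List Int) (i : Nat) : performOpsA op i = pvRunAlt op i := by
  fun_induction performOpsA op i with
  | case1 op i hc =>
    rw [pvRunAlt]
    have : ¬ i < op.length := by simpa [List.getElem?_eq_none_iff] using hc
    simp [this]
  | case2 op i htb hget =>
    have hi : i < op.length := (List.getElem?_eq_some_iff.mp hget).1
    have he : op[i]'hi = 1 := (List.getElem?_eq_some_iff.mp hget).2
    rw [pvRunAlt, dif_pos hi]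
    simp only [he]
    by_cases h3 : i + 3 < op.length
    · by_cases hbd : PySem.Raise.InRange op.length (op[i+1]'(by omega)) ∧
          PySem.Raise.InRange op.length (op[i+2]'(by omega)) ∧ PySem.Raise.InRange op.length (op[i+3]'h3)
      · have := tb_some op i (· + ·) h3 hbd.1 hbd.2.1 hbd.2.2
        rw [htb] at this; exact absurd this (by simp)
      · simp [h3, hbd]
    · simp [h3]
  | case3 op i op' htb hget ih =>
    have hi : i < op.length := (List.getElem?_eq_some_iff.mp hget).1
    have he : op[i]'hi = 1 := (List.getElem?_eq_some_iff.mp hget).2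
    have h3 : i + 3 < op.length := by
      by_contra h3
      rw [tb_none_oob op i _ h3] at htb; exact absurd htb (by simp)
    have hbd : PySem.Raise.InRange op.length (op[i+1]'(by omega)) ∧
        PySem.Raise.InRange op.length (op[i+2]'(by omega)) ∧ PySem.Raise.InRange op.length (op[i+3]'h3) := by
      by_contra hbd
      rw [tb_none_bad op i _ h3 hbd] at htb; exact absurd htb (by simp)
    have hv := tb_some op i (· + ·) h3 hbd.1 hbd.2.1 hbd.2.2
    rw [htb] at hv
    injection hv with hv
    rw [pvRunAlt, dif_pos hi]
    simp only [he]
    simp [h3, hbd, ← hv, ih]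
  | case4 op i htb hget _ =>
    have hi : i < op.length := (List.getElem?_eq_some_iff.mp hget).1
    have he : op[i]'hi = 2 := (List.getElem?_eq_some_iff.mp hget).2
    rw [pvRunAlt, dif_pos hi]
    simp only [he]
    by_cases h3 : i + 3 < op.length
    · by_cases hbd : PySem.Raise.InRange op.length (op[i+1]'(by omega)) ∧
          PySem.Raise.InRange op.length (op[i+2]'(by omega)) ∧ PySem.Raise.InRange op.length (op[i+3]'h3)
      · have := tb_some op i (· * ·) h3 hbd.1 hbd.2.1 hbd.2.2
        rw [htb] at this; exact absurd this (by simp)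
      · simp [h3, hbd]
    · simp [h3]
  | case5 op i op' htb hget _ ih =>
    have hi : i < op.length := (List.getElem?_eq_some_iff.mp hget).1
    have he : op[i]'hi = 2 := (List.getElem?_eq_some_iff.mp hget).2
    have h3 : i + 3 < op.length := by
      by_contra h3
      rw [tb_none_oob op i _ h3] at htb; exact absurd htb (by simp)
    have hbd : PySem.Raise.InRange op.length (op[i+1]'(by omega)) ∧
        PySem.Raise.InRange op.length (op[i+2]'(by omega)) ∧ PySem.Raise.InRange op.length (op[i+3]'h3) := by
      by_contra hbd
      rw [tb_none_bad op i _ h3 hbd] at htb; exact absurd htb (by simp)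
    have hv := tb_some op i (· * ·) h3 hbd.1 hbd.2.1 hbd.2.2
    rw [htb] at hv
    injection hv with hv
    rw [pvRunAlt, dif_pos hi]
    simp only [he]
    simp [h3, hbd, ← hv, ih]
  | case6 op i hget _ _ =>
    have hi : i < op.length := (List.getElem?_eq_some_iff.mp hget).1
    have he : op[i]'hi = 99 := (List.getElem?_eq_some_iff.mp hget).2
    rw [pvRunAlt, dif_pos hi]
    simp [he]
  | case7 op i c hget hc1 hc2 hc99 ih =>
    have hi : i < op.length := (List.getElem?_eq_some_iff.mp hget).1
    have he : op[i]'hi = c := (List.getElem?_eq_some_iff.mp hget).2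
    rw [pvRunAlt, dif_pos hi]
    simp [he, hc1, hc2, hc99, ih]

-- last match of a left fold = first match of the reversed findSome?
theorem pvFoldlGetD {α β : Type} (l : List α) (h : α → Option β) (init : β) :
    l.foldl (fun acc x => (h x).getD acc) init = (l.reverse.findSome? h).getD init := by
  induction l generalizing init with
  | nil => simp
  | cons x l ih =>
    rw [List.foldl_cons, ih]
    simp only [List.reverse_cons, List.findSome?_append]
    cases hf : l.reverse.findSome? h with
    | some y => simp
    | none => simp

theorem pvFindSomeMap {α β γ : Type} (l : List α) (k : α → Option β) (g : β → γ) :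
    l.findSome? (fun x => (k x).map g) = (l.findSome? k).map g := by
  induction l with
  | nil => simp
  | cons x l ih => cases h : k x <;> simp [h, ih]

theorem pvMain (ops : List Int) (num : Int) : findInputs ops num = findInputs_alt ops num := by
  unfold findInputs findInputs_alt
  have hrev : PySem.List.pyRange 99 (-1) (-1) = (PySem.List.pyRange 0 100 1).reverse := by
    simpa using PySem.List.pyRange_neg_one_eq_reverse 99 (-1)
  rw [hrev]
  simp only [← pvSim]
  set R := PySem.List.pyRange 0 100 1 with hR
  set H : Int → Option (Int × Int) := fun p1 => R.reverse.findSome? (fun p2 =>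
    if PySem.List.pyGetD (performOpsA (PySem.List.pySetD (PySem.List.pySetD ops 1 p1) 2 p2) 0) 0 0 = num
    then some (p1, p2) else none) with hH
  have hin : ∀ (p1 : Int) (pos : Int × Int),
      R.foldl (fun pos p2 =>
        if PySem.List.pyGetD (performOpsA (PySem.List.pySetD (PySem.List.pySetD ops 1 p1) 2 p2) 0) 0 0 = num
        then (p1, p2) else pos) pos = (H p1).getD pos := by
    intro p1 pos
    rw [hH]
    rw [show (fun (pos : Int × Int) p2 =>
        if PySem.List.pyGetD (performOpsA (PySem.List.pySetD (PySem.List.pySetD ops 1 p1) 2 p2) 0) 0 0 = num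
        then (p1, p2) else pos)
      = (fun (pos : Int × Int) p2 => ((fun p2 =>
        if PySem.List.pyGetD (performOpsA (PySem.List.pySetD (PySem.List.pySetD ops 1 p1) 2 p2) 0) 0 0 = num
        then some (p1, p2) else none) p2).getD pos) from funext fun pos => funext fun p2 => by
          by_cases h : PySem.List.pyGetD (performOpsA (PySem.List.pySetD (PySem.List.pySetD ops 1 p1) 2 p2) 0) 0 0 = num <;> simp [h]]
    exact pvFoldlGetD R _ pos
  have hA : (R.foldl (fun (pos : Int × Int) p1 =>
      R.foldl (fun pos p2 =>
        if PySem.List.pyGetD (performOpsA (PySem.List.pySetD (PySem.List.pySetD ops 1 p1) 2 p2) 0) 0 0 = num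
        then (p1, p2) else pos) pos) ((0 : Int), (0 : Int))) = (R.reverse.findSome? H).getD (0, 0) := by
    rw [show (fun (pos : Int × Int) p1 =>
      R.foldl (fun pos p2 =>
        if PySem.List.pyGetD (performOpsA (PySem.List.pySetD (PySem.List.pySetD ops 1 p1) 2 p2) 0) 0 0 = num
        then (p1, p2) else pos) pos) = (fun (pos : Int × Int) p1 => (H p1).getD pos)
      from funext fun pos => funext fun p1 => hin p1 pos]
    exact pvFoldlGetD R H (0, 0)
  have hB : (R.reverse.findSome? (fun p1 => R.reverse.findSome? (fun p2 =>
      if PySem.List.pyGetD (performOpsA (PySem.List.pySetD (PySem.List.pySetD ops 1 p1) 2 p2) 0) 0 0 = num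
      then some [p1, p2] else none)))
      = (R.reverse.findSome? H).map (fun q => [q.1, q.2]) := by
    rw [← pvFindSomeMap]
    congr 1
    funext p1
    rw [hH, ← pvFindSomeMap]
    congr 1
    funext p2
    split_ifs <;> rfl
  simp only [hA, hB]
  cases hf : R.reverse.findSome? H with
  | none => simp
  | some q => simp

-- ===== VERDICT (by name: the statement is the Claim_ definition above) =====
theorem findInputs_spec : Claim_equal_findInputs := by
  intro ops num _ _
  unfold Spec_findInputs
  exact pvMain ops num
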